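-- pv_equiv track=rewrite | github.com/PymZoR/adventofcode-2019 | day3.py | wire_dist
-- ===== SOURCE A (Python) =====
-- def manhattan(point):
--     return abs(point[0]) + abs(point[1])
--
-- def wire_dist(polyline, point):
--     x, y = point
--
--     total_dist = 0
--     for line in polyline:
--         x1, y1 = line[0]
--         x2, y2 = line[1]
--
--         # Point in line
--         if min(x1, x2) <= x <= max(x1, x2) and min(y1, y2) <= y <= max(y1, y2):
--             total_dist = total_dist + manhattan([x-x1, y-y1])
--             break
--         else:
--             total_dist = total_dist + manhattan([x1-x2, y1-y2])
--
--     return total_dist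
-- ===== SOURCE B (Python) =====
-- def manhattan(point):
--     return abs(point[0]) + abs(point[1])
--
-- def wire_dist(polyline, point):
--     x, y = point
--     idx = next((i for i, ((x1, y1), (x2, y2)) in enumerate(polyline)
--                 if min(x1, x2) <= x <= max(x1, x2)
--                 and min(y1, y2) <= y <= max(y1, y2)), None)
--     if idx is None:
--         return sum(manhattan([x1 - x2, y1 - y2]) for (x1, y1), (x2, y2) in polyline)
--     (x1, y1), _ = polyline[idx]
--     return sum(manhattan([a1 - a2, b1 - b2]) for (a1, b1), (a2, b2) in polyline[:idx]) \
--         + manhattan([x - x1, y - y1])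
-- ===== Notes on version B (the rewrite author's own statement) =====
-- stated objective: alternative
-- what changed: Replaces A's single accumulate-and-break loop by a locate-then-sum decomposition: first find the index of the first segment whose bounding box contains the point, then separately sum the full Manhattan lengths of the prefix (or of the whole list if no segment matches) and add the partial distance.
import Mathlib
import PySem

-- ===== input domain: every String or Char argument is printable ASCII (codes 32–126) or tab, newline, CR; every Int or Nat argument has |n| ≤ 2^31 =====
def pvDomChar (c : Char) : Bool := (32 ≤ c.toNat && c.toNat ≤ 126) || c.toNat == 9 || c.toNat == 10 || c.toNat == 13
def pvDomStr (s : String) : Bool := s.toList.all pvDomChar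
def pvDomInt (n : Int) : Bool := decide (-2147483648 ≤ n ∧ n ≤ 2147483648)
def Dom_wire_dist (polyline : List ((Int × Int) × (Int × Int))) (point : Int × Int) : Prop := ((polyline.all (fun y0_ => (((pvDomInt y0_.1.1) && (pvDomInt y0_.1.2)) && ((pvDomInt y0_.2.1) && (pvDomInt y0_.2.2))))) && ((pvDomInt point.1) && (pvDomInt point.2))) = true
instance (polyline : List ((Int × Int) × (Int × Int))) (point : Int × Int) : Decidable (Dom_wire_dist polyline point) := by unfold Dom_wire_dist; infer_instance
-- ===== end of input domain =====

-- B replaces A's accumulate-and-break loop by a locate-then-sum decomposition (same cost, different structure).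

-- ===== PORT A =====
def manhattan (p : Int × Int) : Int := |p.1| + |p.2|

-- A's loop: running total, break on the first containing segment
def wireLoop (point : Int × Int) : List ((Int × Int) × (Int × Int)) → Int → Int
  | [], acc => acc
  | (((x1, y1), (x2, y2)) :: rest), acc =>
    if min x1 x2 ≤ point.1 ∧ point.1 ≤ max x1 x2 ∧ min y1 y2 ≤ point.2 ∧ point.2 ≤ max y1 y2 then
      acc + manhattan (point.1 - x1, point.2 - y1)
    else
      wireLoop point rest (acc + manhattan (x1 - x2, y1 - y2))

def wire_dist (polyline : List ((Int × Int) × (Int × Int))) (point : Int × Int) : Int :=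
  wireLoop point polyline 0

-- ===== PORT B =====
def containsB (point : Int × Int) (seg : (Int × Int) × (Int × Int)) : Bool :=
  decide (min seg.1.1 seg.2.1 ≤ point.1 ∧ point.1 ≤ max seg.1.1 seg.2.1 ∧
          min seg.1.2 seg.2.2 ≤ point.2 ∧ point.2 ≤ max seg.1.2 seg.2.2)

def segLen (seg : (Int × Int) × (Int × Int)) : Int :=
  manhattan (seg.1.1 - seg.2.1, seg.1.2 - seg.2.2)

def wire_dist_alt (polyline : List ((Int × Int) × (Int × Int))) (point : Int × Int) : Int :=
  match polyline.findIdx? (containsB point) with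
  | none => (polyline.map segLen).sum
  | some i =>
    match polyline[i]? with
    | some ((x1, y1), _) =>
        ((polyline.take i).map segLen).sum + manhattan (point.1 - x1, point.2 - y1)
    | none => 0

-- ===== PRECONDITION & SPEC =====
def Spec_wire_dist (polyline : List ((Int × Int) × (Int × Int))) (point : Int × Int) (out : Int) : Prop := out = wire_dist_alt polyline point
instance (polyline : List ((Int × Int) × (Int × Int))) (point : Int × Int) (out : Int) : Decidable (Spec_wire_dist polyline point out) := by unfold Spec_wire_dist; infer_instance

-- ===== CLAIM (what is proved, stated in full; the proofs are below) =====
def Claim_equal_wire_dist : Prop := ∀ (polyline : List ((Int × Int) × (Int × Int))) (point : Int × Int), Dom_wire_dist polyline point → Spec_wire_dist polyline point (wire_dist polyline point)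

-- ===== LEMMAS AND PROOFS =====
theorem wireLoop_eq_alt (point : Int × Int) :
    ∀ (l : List ((Int × Int) × (Int × Int))) (acc : Int),
      wireLoop point l acc = acc + wire_dist_alt l point := by
  intro l
  induction l with
  | nil => intro acc; simp [wireLoop, wire_dist_alt]
  | cons hd tl ih =>
    intro acc
    obtain ⟨⟨x1, y1⟩, ⟨x2, y2⟩⟩ := hd
    by_cases h : min x1 x2 ≤ point.1 ∧ point.1 ≤ max x1 x2 ∧
                 min y1 y2 ≤ point.2 ∧ point.2 ≤ max y1 y2
    · simp [wireLoop, wire_dist_alt, h, List.findIdx?_cons, containsB]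
    · have hc : containsB point ((x1, y1), (x2, y2)) = false := decide_eq_false h
      rw [wireLoop, if_neg h, ih]
      unfold wire_dist_alt
      rw [List.findIdx?_cons, hc]
      cases hfi : tl.findIdx? (containsB point) with
      | none => simp [segLen, manhattan]; ring
      | some i =>
        obtain ⟨hlt, -⟩ := List.findIdx?_eq_some_iff_getElem.mp hfi
        have hg : tl[i]? = some tl[i] := List.getElem?_eq_getElem hlt
        simp [List.take_succ_cons, hg]
        obtain ⟨⟨a, b⟩, c⟩ := tl[i]
        simp [segLen, manhattan]; ring

-- ===== VERDICT (by name: the statement is the Claim_ definition above) =====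
theorem wire_dist_spec : Claim_equal_wire_dist := by
  intro polyline point _
  unfold Spec_wire_dist wire_dist
  rw [wireLoop_eq_alt]
  ring
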